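-- pv_equiv track=rewrite | github.com/calvinloveland/megarepo | active/web-apps/parambulator/src/parambulator/app.py | parse_layout_map
-- ===== SOURCE A (Python) =====
-- from typing import Dict, List, Optional
--
-- def parse_layout_map(raw_text: str, rows: int, cols: int) -> List[List[bool]]:
--     if not raw_text.strip():
--         return [[True for _ in range(cols)] for _ in range(rows)]
--     lines = [line.strip() for line in raw_text.splitlines() if line.strip()]
--     layout: List[List[bool]] = []
--     for row_index in range(rows):
--         if row_index < len(lines):
--             row_raw = lines[row_index].replace(" ", "").replace(",", "")
--         else:
--             row_raw = ""
--         row: List[bool] = []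
--         for col_index in range(cols):
--             if col_index < len(row_raw):
--                 char = row_raw[col_index]
--                 row.append(char in {"1", "x", "X", "#", "o", "O"})
--             else:
--                 row.append(True)
--         layout.append(row)
--     return layout
-- ===== SOURCE B (Python) =====
-- from typing import List
--
-- def parse_layout_map(raw_text: str, rows: int, cols: int) -> List[List[bool]]:
--     # Default-True grid; record only the coordinates of blocked (non-truthy) cells
--     # in a sparse set during a single pass over the text, then build the grid by
--     # set lookup.
--     falsy = set()
--     r = 0
--     for raw_line in raw_text.splitlines():
--         line = raw_line.strip()
--         if not line:
--             continue
--         if r >= rows: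
--             break
--         cleaned = line.replace(" ", "").replace(",", "")
--         for c, ch in enumerate(cleaned[:cols]):
--             if ch not in "1xX#oO":
--                 falsy.add((r, c))
--         r += 1
--     return [[(r, c) not in falsy for c in range(cols)] for r in range(rows)]
-- ===== Notes on version B (the rewrite author's own statement) =====
-- stated objective: alternative
-- what changed: Inverts the construction: instead of computing every cell with per-index range loops and in-range checks (plus a special blank-text guard), B makes one pass over the text collecting only the coordinates of non-truthy characters into a sparse set, then emits a default-True grid by set lookup.
import Mathlib
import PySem

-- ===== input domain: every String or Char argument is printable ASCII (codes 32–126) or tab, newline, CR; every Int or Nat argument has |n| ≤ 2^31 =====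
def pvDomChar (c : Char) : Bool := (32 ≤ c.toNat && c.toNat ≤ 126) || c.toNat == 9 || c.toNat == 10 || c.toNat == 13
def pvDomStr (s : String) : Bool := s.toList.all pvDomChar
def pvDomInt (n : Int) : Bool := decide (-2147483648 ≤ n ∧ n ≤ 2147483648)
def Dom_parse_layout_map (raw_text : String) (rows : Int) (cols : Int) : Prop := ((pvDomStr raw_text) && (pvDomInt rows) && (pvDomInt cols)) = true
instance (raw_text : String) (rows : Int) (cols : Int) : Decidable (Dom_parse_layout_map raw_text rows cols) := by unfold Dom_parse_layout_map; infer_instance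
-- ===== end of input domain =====

-- B inverts the construction: one pass over the text collects the coordinates of non-truthy
-- characters into a sparse set, and the grid is then emitted default-True with a set lookup per
-- cell — instead of A's per-row/per-column index loops with in-range checks and a blank-text guard
-- (objective: alternative, same return value).


-- ===== PORT A =====
def parse_layout_map (raw_text : String) (rows : Int) (cols : Int) : List (List Bool) :=
  if (PySem.Chars.strip raw_text.toList).isEmpty then
    (PySem.List.pyRange 0 rows 1).map (fun _ =>
      (PySem.List.pyRange 0 cols 1).map (fun _ => true))
  else
    let lines : List (List Char) :=
      ((PySem.Chars.splitlines raw_text.toList).filter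
        (fun line => !(PySem.Chars.strip line).isEmpty)).map PySem.Chars.strip
    (PySem.List.pyRange 0 rows 1).foldl (fun layout row_index =>
      let row_raw : List Char :=
        if row_index < (lines.length : Int) then
          PySem.Chars.replace (PySem.Chars.replace
            (PySem.List.pyGetD lines row_index []) [' '] []) [','] []
        else []
      let row : List Bool :=
        (PySem.List.pyRange 0 cols 1).foldl (fun row col_index =>
          if col_index < (row_raw.length : Int) then
            row ++ [['1', 'x', 'X', '#', 'o', 'O'].contains
              (PySem.List.pyGetD row_raw col_index ' ')]
          else
            row ++ [true]) []
      layout ++ [row]) []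

-- ===== PORT B =====
-- truthy characters: "1xX#oO"
def pvTruthy : List Char := ['1', 'x', 'X', '#', 'o', 'O']

-- inner loop: for c, ch in enumerate(cleaned[:cols]): if ch not in truthy: falsy.add((r, c))
def pvRowFalsy (r : Int) (cols : Int) (cleaned : List Char)
    (s : PySem.Set (Int × Int)) : PySem.Set (Int × Int) :=
  (PySem.List.enumerate (PySem.List.slice cleaned none (some cols)) 0).foldl
    (fun s p => if !(pvTruthy.contains p.2) then PySem.Set.add s (r, p.1) else s) s

-- outer loop over splitlines with the running row counter r and the break at r >= rows
def pvCollect (lines : List (List Char)) (rows cols : Int) (r : Int)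
    (s : PySem.Set (Int × Int)) : PySem.Set (Int × Int) :=
  match lines with
  | [] => s
  | ln :: rest =>
    let st := PySem.Chars.strip ln
    if st.isEmpty then pvCollect rest rows cols r s
    else if rows ≤ r then s
    else pvCollect rest rows cols (r + 1)
      (pvRowFalsy r cols
        (PySem.Chars.replace (PySem.Chars.replace st [' '] []) [','] []) s)

def parse_layout_map_alt (raw_text : String) (rows : Int) (cols : Int) : List (List Bool) :=
  let falsy := pvCollect (PySem.Chars.splitlines raw_text.toList) rows cols 0 PySem.Set.empty
  (PySem.List.pyRange 0 rows 1).map (fun r =>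
    (PySem.List.pyRange 0 cols 1).map (fun c => !(PySem.Set.contains falsy (r, c))))

-- ===== PRECONDITION & SPEC =====
def Spec_parse_layout_map (raw_text : String) (rows : Int) (cols : Int) (out : List (List Bool)) : Prop := out = parse_layout_map_alt raw_text rows cols
instance (raw_text : String) (rows : Int) (cols : Int) (out : List (List Bool)) : Decidable (Spec_parse_layout_map raw_text rows cols out) := by unfold Spec_parse_layout_map; infer_instance

-- ===== CLAIM (what is proved, stated in full; the proofs are below) =====
def Claim_equal_parse_layout_map : Prop := ∀ (raw_text : String) (rows : Int) (cols : Int), Dom_parse_layout_map raw_text rows cols → Spec_parse_layout_map raw_text rows cols (parse_layout_map raw_text rows cols)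

-- ===== LEMMAS AND PROOFS =====

-- proof-only canonical form: truncate-map-pad over the padded cleaned-line list
def pvClean (ln : List Char) : List Char :=
  PySem.Chars.replace (PySem.Chars.replace (PySem.Chars.strip ln) [' '] []) [','] []

def pvCanon (raw_text : String) (rows : Int) (cols : Int) : List (List Bool) :=
  let cleaned : List (List Char) :=
    ((PySem.Chars.splitlines raw_text.toList).filter
      (fun ln => !(PySem.Chars.strip ln).isEmpty)).map pvClean
  let padded := PySem.List.slice cleaned none (some (max rows 0)) ++
    PySem.List.pyRepeat [([] : List Char)] (max rows 0 - (cleaned.length : Int))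
  padded.map (fun line =>
    let pre := PySem.List.slice line none (some (max cols 0))
    pre.map (fun c => pvTruthy.contains c) ++
      PySem.List.pyRepeat [true] (max cols 0 - (pre.length : Int)))

theorem row_eq (rr : List Char) (cols : Int) :
    (PySem.List.pyRange 0 cols 1).foldl (fun row col_index =>
      if col_index < (rr.length : Int) then
        row ++ [['1', 'x', 'X', '#', 'o', 'O'].contains
          (PySem.List.pyGetD rr col_index ' ')]
      else
        row ++ [true]) [] =
    (PySem.List.slice rr none (some (max cols 0))).map
        (fun c => pvTruthy.contains c) ++
      PySem.List.pyRepeat [true]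
        (max cols 0 - ((PySem.List.slice rr none (some (max cols 0))).length : Int)) := by
  have hit : ∀ (row : List Bool) (j : Int),
      (if j < (rr.length : Int) then
        row ++ [['1','x','X','#','o','O'].contains (PySem.List.pyGetD rr j ' ')]
      else row ++ [true]) =
      row ++ [if j < (rr.length : Int) then
        ['1','x','X','#','o','O'].contains (PySem.List.pyGetD rr j ' ') else true] := by
    intro row j; split <;> rfl
  simp only [hit]
  rw [PySem.List.foldl_append_singleton_eq_map, List.nil_append]
  rw [PySem.List.slice_to rr (b := max cols 0) (le_max_right _ _),
    PySem.List.pyRepeat_singleton, PySem.List.pyRange_one, List.map_map]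
  apply List.ext_getElem
  · simp [List.length_take]
    omega
  · intro i h1 h2
    simp only [List.getElem_map, List.getElem_range, Function.comp]
    have hi : i < (cols - 0).toNat := by simpa using h1
    by_cases hlt : i < rr.length
    · have hmin : i < min (max cols 0).toNat rr.length := by omega
      rw [List.getElem_append_left (by simpa [List.length_take] using hmin)]
      simp only [List.getElem_map, List.getElem_take]
      rw [if_pos (by omega)]
      unfold pvTruthy
      congr 1
      rw [show ((0:Int) + (i:Int)) = (i:Int) by ring, PySem.List.pyGetD_natCast]
      exact List.getD_eq_getElem rr ' ' hlt
    · rw [List.getElem_append_right (by simp [List.length_take]; omega)]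
      rw [if_neg (by omega)]
      simp [List.getElem_replicate]

theorem go_chars_sub (isB : Char → Bool) (s cur : List Char) (acc : List (List Char)) :
    ∀ l ∈ PySem.Chars.splitlines.go isB s cur acc, ∀ c ∈ l,
      c ∈ s ∨ c ∈ cur ∨ ∃ l' ∈ acc, c ∈ l' := by
  fun_induction PySem.Chars.splitlines.go isB s cur acc with
  | case1 cur acc h =>
    intro l hl c hc
    right; right
    exact ⟨l, List.mem_reverse.1 hl, hc⟩
  | case2 cur acc h =>
    intro l hl c hc
    rcases List.mem_cons.1 (List.mem_reverse.1 hl) with rfl | h'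
    · right; left; exact List.mem_reverse.1 hc
    · right; right; exact ⟨l, h', hc⟩
  | case3 rest cur acc ih =>
    intro l hl c hc
    rcases ih l hl c hc with h | h | ⟨a, ha, hca⟩
    · tauto
    · simp at h
    · rcases List.mem_cons.1 ha with rfl | ha'
      · right; left; exact List.mem_reverse.1 hca
      · right; right; exact ⟨a, ha', hca⟩
  | case4 c1 rest cur acc hx hB ih =>
    intro l hl c hc
    rcases ih l hl c hc with h | h | ⟨a, ha, hca⟩
    · tauto
    · simp at h
    · rcases List.mem_cons.1 ha with rfl | ha'
      · right; left; exact List.mem_reverse.1 hca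
      · right; right; exact ⟨a, ha', hca⟩
  | case5 c1 rest cur acc hx hB ih =>
    intro l hl c hc
    rcases ih l hl c hc with h | h | ⟨a, ha, hca⟩
    · tauto
    · rcases List.mem_cons.1 h with rfl | h'
      · left; exact List.mem_cons_self
      · tauto
    · right; right; exact ⟨a, ha, hca⟩

theorem splitlines_chars_sub (s : List Char) :
    ∀ l ∈ PySem.Chars.splitlines s, ∀ c ∈ l, c ∈ s := by
  intro l hl c hc
  have := go_chars_sub _ s [] [] l (by simpa [PySem.Chars.splitlines] using hl) c hc
  simpa using this

theorem strip_eq_nil_iff (s : List Char) :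
    PySem.Chars.strip s = [] ↔ ∀ c ∈ s, PySem.Chars.isspace c := by
  simp only [PySem.Chars.strip, PySem.Chars.rstrip, PySem.Chars.lstrip]
  rw [List.reverse_eq_nil_iff, List.dropWhile_eq_nil_iff]
  constructor
  · intro h c hc
    by_cases hd : c ∈ List.dropWhile PySem.Chars.isspace s
    · exact h c (by simpa using hd)
    · have hs : s = List.takeWhile PySem.Chars.isspace s ++ List.dropWhile PySem.Chars.isspace s :=
        (List.takeWhile_append_dropWhile).symm
      have hm : c ∈ List.takeWhile PySem.Chars.isspace s := by
        rw [hs] at hc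
        rcases List.mem_append.1 hc with h' | h'
        · exact h'
        · exact absurd h' hd
      exact List.mem_takeWhile_imp hm
  · intro h c hc
    exact h c ((List.dropWhile_sublist _).mem (by simpa using hc))

theorem lines_blank_of_strip_nil (s : List Char)
    (h : PySem.Chars.strip s = []) :
    ∀ l ∈ PySem.Chars.splitlines s, PySem.Chars.strip l = [] := by
  intro l hl
  rw [strip_eq_nil_iff] at h ⊢
  intro c hc
  exact h c (splitlines_chars_sub s l hl c hc)

theorem pad_eq (L : List (List Char)) (rep : List Char → List Char) (rows : Int) :
    (PySem.List.pyRange 0 rows 1).map (fun i =>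
      if i < (L.length : Int) then rep (PySem.List.pyGetD L i []) else []) =
    PySem.List.slice (L.map rep) none (some (max rows 0)) ++
      PySem.List.pyRepeat [([] : List Char)] (max rows 0 - ((L.map rep).length : Int)) := by
  rw [PySem.List.slice_to (L.map rep) (b := max rows 0) (le_max_right _ _),
    PySem.List.pyRepeat_singleton, PySem.List.pyRange_one, List.map_map]
  apply List.ext_getElem
  · simp [List.length_take]
    omega
  · intro i h1 h2
    simp only [List.getElem_map, List.getElem_range, Function.comp]
    have hi : i < (rows - 0).toNat := by simpa using h1
    by_cases hlt : i < L.length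
    · have hmin : i < min (max rows 0).toNat (L.map rep).length := by simp; omega
      rw [List.getElem_append_left (by simpa [List.length_take] using hmin)]
      simp only [List.getElem_take, List.getElem_map]
      rw [if_pos (by omega)]
      congr 1
      rw [show ((0:Int) + (i:Int)) = (i:Int) by ring, PySem.List.pyGetD_natCast]
      exact List.getD_eq_getElem L [] hlt
    · rw [List.getElem_append_right (by simp [List.length_take]; omega)]
      rw [if_neg (by omega)]
      simp [List.getElem_replicate]

theorem pad_eq' (filt : List (List Char)) (rows : Int) :
    (PySem.List.pyRange 0 rows 1).map (fun i =>
      if i < ((filt.map PySem.Chars.strip).length : Int) then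
        PySem.Chars.replace (PySem.Chars.replace
          (PySem.List.pyGetD (filt.map PySem.Chars.strip) i []) [' '] []) [','] []
      else []) =
    PySem.List.slice (filt.map pvClean) none (some (max rows 0)) ++
      PySem.List.pyRepeat [([] : List Char)]
        (max rows 0 - ((filt.map pvClean).length : Int)) := by
  have h := pad_eq (filt.map PySem.Chars.strip)
    (fun x => PySem.Chars.replace (PySem.Chars.replace x [' '] []) [','] []) rows
  simpa [List.map_map, Function.comp, pvClean] using h

-- A equals the canonical truncate-map-pad form
theorem a_eq_canon (raw_text : String) (rows cols : Int) :
    parse_layout_map raw_text rows cols = pvCanon raw_text rows cols := by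
  unfold parse_layout_map pvCanon
  set s := raw_text.toList with hs
  set filt := (PySem.Chars.splitlines s).filter (fun l => !(PySem.Chars.strip l).isEmpty) with hfilt
  by_cases hE : (PySem.Chars.strip s).isEmpty
  · rw [if_pos hE]
    have hstrip : PySem.Chars.strip s = [] := List.isEmpty_iff.1 hE
    have hnil : filt = [] := by
      rw [hfilt, List.filter_eq_nil_iff]
      intro l hl
      simp [lines_blank_of_strip_nil s hstrip l hl]
    rw [hnil]
    simp only [List.map_nil,
      PySem.List.slice_to ([] : List (List Char)) (b := max rows 0) (le_max_right _ _),
      PySem.List.pyRepeat_singleton, List.take_nil, List.nil_append, List.length_nil,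
      List.map_replicate]
    rw [List.map_const', List.map_const', PySem.List.length_pyRange_one,
      PySem.List.length_pyRange_one,
      PySem.List.slice_to ([] : List Char) (b := max cols 0) (le_max_right _ _)]
    simp only [List.take_nil, List.map_nil, List.length_nil, List.nil_append]
    congr 1
    · omega
    · congr 1
      omega
  · rw [if_neg hE]
    simp only []
    have hout : ∀ (f : Int → List Bool) (l : List Int),
        l.foldl (fun layout i => layout ++ [f i]) [] = l.map f :=
      fun f l => by simpa using PySem.List.foldl_append_singleton_eq_map f l []
    rw [hout]
    have hcong : ∀ i ∈ PySem.List.pyRange 0 rows 1,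
        ((PySem.List.pyRange 0 cols 1).foldl (fun row col_index =>
          if col_index < (((if i < ((filt.map PySem.Chars.strip).length : Int) then
              PySem.Chars.replace (PySem.Chars.replace
                (PySem.List.pyGetD (filt.map PySem.Chars.strip) i []) [' '] []) [','] []
            else []).length : Int)) then
            row ++ [['1', 'x', 'X', '#', 'o', 'O'].contains
              (PySem.List.pyGetD (if i < ((filt.map PySem.Chars.strip).length : Int) then
              PySem.Chars.replace (PySem.Chars.replace
                (PySem.List.pyGetD (filt.map PySem.Chars.strip) i []) [' '] []) [','] []
            else []) col_index ' ')]
          else row ++ [true]) []) = ((fun line =>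
              (PySem.List.slice line none (some (max cols 0))).map
                (fun c => pvTruthy.contains c) ++
              PySem.List.pyRepeat [true]
                (max cols 0 - ((PySem.List.slice line none (some (max cols 0))).length : Int))) ∘
            (fun i => if i < ((filt.map PySem.Chars.strip).length : Int) then
              PySem.Chars.replace (PySem.Chars.replace
                (PySem.List.pyGetD (filt.map PySem.Chars.strip) i []) [' '] []) [','] []
            else [])) i := fun i _ => row_eq _ cols
    rw [List.map_congr_left hcong, ← List.map_map, pad_eq' filt rows]

-- membership in a conditional-add fold
theorem mem_foldl_condAdd (P : Int × Char → Bool) (f : Int × Char → Int × Int)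
    (L : List (Int × Char)) :
    ∀ (s : PySem.Set (Int × Int)) (p : Int × Int),
      p ∈ L.foldl (fun s x => if P x then PySem.Set.add s (f x) else s) s ↔
        p ∈ s ∨ ∃ x ∈ L, P x = true ∧ p = f x := by
  induction L with
  | nil => intro s p; simp
  | cons x xs ih =>
    intro s p
    simp only [List.foldl_cons, List.mem_cons]
    by_cases hP : P x = true
    · rw [if_pos hP, ih]
      rw [PySem.Set.mem_add]
      constructor
      · rintro (⟨h | h⟩ | ⟨y, hy, hPy, hpy⟩)
        · exact Or.inl h
        · exact Or.inr ⟨x, Or.inl rfl, hP, h⟩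
        · exact Or.inr ⟨y, Or.inr hy, hPy, hpy⟩
      · rintro (h | ⟨y, (rfl | hy), hPy, hpy⟩)
        · exact Or.inl (Or.inl h)
        · exact Or.inl (Or.inr hpy)
        · exact Or.inr ⟨y, hy, hPy, hpy⟩
    · rw [if_neg hP, ih]
      constructor
      · rintro (h | ⟨y, hy, hPy, hpy⟩)
        · exact Or.inl h
        · exact Or.inr ⟨y, Or.inr hy, hPy, hpy⟩
      · rintro (h | ⟨y, (rfl | hy), hPy, hpy⟩)
        · exact Or.inl h
        · exact absurd hPy hP
        · exact Or.inr ⟨y, hy, hPy, hpy⟩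

-- membership after one row's inner loop
theorem mem_rowFalsy (r cols : Int) (cleaned : List Char) (s : PySem.Set (Int × Int))
    (p q : Int) :
    (p, q) ∈ pvRowFalsy r cols cleaned s ↔
      (p, q) ∈ s ∨ (p = r ∧ ∃ k : Nat, ∃ _ : k < (PySem.List.slice cleaned none (some cols)).length,
        q = (k : Int) ∧
        pvTruthy.contains (PySem.List.slice cleaned none (some cols))[k] = false) := by
  unfold pvRowFalsy
  rw [mem_foldl_condAdd]
  constructor
  · rintro (h | ⟨x, hx, hPx, hpx⟩)
    · exact Or.inl h
    · rcases (PySem.List.mem_enumerate_iff _ _ _).1 hx with ⟨k, hk, rfl⟩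
      rw [Bool.not_eq_true'] at hPx
      have h1 := hpx
      rw [Prod.mk.injEq] at h1
      refine Or.inr ⟨h1.1, k, hk, by omega, hPx⟩
  · rintro (h | ⟨rfl, k, hk, rfl, hf⟩)
    · exact Or.inl h
    · refine Or.inr ⟨((0 : Int) + (k : Int), (PySem.List.slice cleaned none (some cols))[k]),
        (PySem.List.mem_enumerate_iff _ _ _).2 ⟨k, hk, rfl⟩, ?_, by simp⟩
      rw [Bool.not_eq_true']
      exact hf

-- the cleaned-line list a pass of pvCollect corresponds to
def pvF (lines : List (List Char)) : List (List Char) :=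
  (lines.filter (fun l => !(PySem.Chars.strip l).isEmpty)).map pvClean

theorem mem_collect (rows cols : Int) (lines : List (List Char)) :
    ∀ (r0 : Int) (s : PySem.Set (Int × Int)) (p q : Int),
      (p, q) ∈ pvCollect lines rows cols r0 s ↔
        (p, q) ∈ s ∨ ∃ i : Nat, ∃ _ : i < (pvF lines).length,
          r0 + (i : Int) < rows ∧ p = r0 + (i : Int) ∧
          ∃ k : Nat, ∃ _ : k < (PySem.List.slice (pvF lines)[i] none (some cols)).length,
            q = (k : Int) ∧
            pvTruthy.contains (PySem.List.slice (pvF lines)[i] none (some cols))[k] = false := by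
  induction lines with
  | nil => intro r0 s p q; simp [pvCollect, pvF]
  | cons ln rest ih =>
    intro r0 s p q
    by_cases hb : (PySem.Chars.strip ln).isEmpty
    · have hF : pvF (ln :: rest) = pvF rest := by
        simp [pvF, hb]
      rw [show pvCollect (ln :: rest) rows cols r0 s = pvCollect rest rows cols r0 s by
        simp [pvCollect, hb], ih, hF]
    · have hF : pvF (ln :: rest) = pvClean ln :: pvF rest := by
        simp [pvF, hb]
      by_cases hr : rows ≤ r0
      · rw [show pvCollect (ln :: rest) rows cols r0 s = s by
          simp [pvCollect, hb, hr]]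
        constructor
        · exact Or.inl
        · rintro (h | ⟨i, hi, hlt, _⟩)
          · exact h
          · omega
      · rw [show pvCollect (ln :: rest) rows cols r0 s =
            pvCollect rest rows cols (r0 + 1) (pvRowFalsy r0 cols (pvClean ln) s) by
          simp [pvCollect, hb, hr, pvClean], ih, mem_rowFalsy, hF]
        constructor
        · rintro ((h | ⟨rfl, k, hk, rfl, hf⟩) | ⟨i, hi, hlt, rfl, hq⟩)
          · exact Or.inl h
          · exact Or.inr ⟨0, by simp, by omega, by omega, k, by simpa using hk, rfl,
              by simpa using hf⟩
          · exact Or.inr ⟨i + 1, by simpa using Nat.succ_lt_succ hi, by push_cast; omega,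
              by push_cast; omega, by simpa using hq⟩
        · rintro (h | ⟨i, hi, hlt, rfl, hq⟩)
          · exact Or.inl (Or.inl h)
          · cases i with
            | zero =>
              refine Or.inl (Or.inr ⟨by omega, ?_⟩)
              simpa using hq
            | succ j =>
              refine Or.inr ⟨j, by simpa using Nat.lt_of_succ_lt_succ hi, by push_cast at hlt ⊢; omega,
                by push_cast; ring, by simpa using hq⟩

-- canonical form equals B
theorem canon_eq_alt (raw_text : String) (rows cols : Int) :
    pvCanon raw_text rows cols = parse_layout_map_alt raw_text rows cols := by
  unfold pvCanon parse_layout_map_alt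
  dsimp only
  set F := ((PySem.Chars.splitlines raw_text.toList).filter
    (fun ln => !(PySem.Chars.strip ln).isEmpty)).map pvClean with hFdef
  have hFF : F = pvF (PySem.Chars.splitlines raw_text.toList) := rfl
  rw [PySem.List.slice_to F (b := max rows 0) (le_max_right _ _),
    PySem.List.pyRepeat_singleton]
  simp only [PySem.List.pyRange_one]
  apply List.ext_getElem
  · simp [List.length_take]
    omega
  · intro i h1 h2
    have hi : i < (rows - 0).toNat := by
      simp only [List.length_map, List.length_range] at h2
      omega
    simp only [List.getElem_map, List.getElem_range]
    have hrowspos : 0 < rows := by omega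
    have hmem := mem_collect rows cols (PySem.Chars.splitlines raw_text.toList)
      0 PySem.Set.empty
    rw [← hFF] at hmem
    by_cases hiF : i < F.length
    · -- row i comes from a cleaned line
      rw [List.getElem_append_left (by simp [List.length_take]; omega),
        List.getElem_take]
      rw [PySem.List.slice_to (F[i]) (b := max cols 0) (le_max_right _ _),
        PySem.List.pyRepeat_singleton]
      apply List.ext_getElem
      · simp [List.length_take]
        omega
      · intro j hj1 hj2
        have hjc : j < (cols - 0).toNat := by
          simp only [List.length_map, List.length_range] at hj2
          omega
        have hcolspos : 0 < cols := by omega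
        simp only [List.getElem_map, List.getElem_range]
        have hsl : PySem.List.slice (F[i]) none (some cols) = List.take cols.toNat (F[i]) :=
          PySem.List.slice_to _ (by omega)
        by_cases hjL : j < (F[i]).length
        · -- inside the cleaned line
          have hjslice : j < (PySem.List.slice (F[i]) none (some cols)).length := by
            rw [hsl]
            simp [List.length_take]
            omega
          have hval : (PySem.List.slice (F[i]) none (some cols))[j]'hjslice = (F[i])[j] := by
            rw [List.getElem_of_eq hsl hjslice, List.getElem_take]
          rw [List.getElem_append_left (by simp [List.length_take]; omega),
            List.getElem_map, List.getElem_take]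
          by_cases hT : pvTruthy.contains ((F[i])[j]) = true
          · -- truthy char: cell True, coordinate not collected
            have hC : PySem.Set.contains
                (pvCollect (PySem.Chars.splitlines raw_text.toList) rows cols 0 PySem.Set.empty)
                ((0:Int) + (i:Int), (0:Int) + (j:Int)) = false := by
              apply Bool.eq_false_iff.mpr
              intro hct
              rw [PySem.Set.contains_iff, hmem] at hct
              rcases hct with h | ⟨i', hi', hlt', heq, k, hk, hqk, hT'⟩
              · simp [PySem.Set.empty] at h
              · have hii : i' = i := by omega
                subst hii
                have hkj : k = j := by omega
                subst hkj
                rw [hval] at hT'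
                rw [hT] at hT'
                exact absurd hT' (by simp)
            rw [hC, hT]
            rfl
          · have hTf : pvTruthy.contains ((F[i])[j]) = false := by
              cases h : pvTruthy.contains ((F[i])[j]) with
              | true => exact absurd h hT
              | false => rfl
            have hC : PySem.Set.contains
                (pvCollect (PySem.Chars.splitlines raw_text.toList) rows cols 0 PySem.Set.empty)
                ((0:Int) + (i:Int), (0:Int) + (j:Int)) = true := by
              rw [PySem.Set.contains_iff, hmem]
              exact Or.inr ⟨i, hiF, by omega, rfl, j, hjslice, by omega, by rw [hval]; exact hTf⟩
            rw [hC, hTf]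
            rfl
        · -- padding beyond the cleaned line: True, nothing collected there
          rw [List.getElem_append_right (by simp [List.length_take]; omega),
            List.getElem_replicate]
          have hC : PySem.Set.contains
              (pvCollect (PySem.Chars.splitlines raw_text.toList) rows cols 0 PySem.Set.empty)
              ((0:Int) + (i:Int), (0:Int) + (j:Int)) = false := by
            apply Bool.eq_false_iff.mpr
            intro hct
            rw [PySem.Set.contains_iff, hmem] at hct
            rcases hct with h | ⟨i', hi', hlt', heq, k, hk, hqk, hT'⟩
            · simp [PySem.Set.empty] at h
            · have hii : i' = i := by omega
              subst hii
              rw [hsl] at hk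
              simp [List.length_take] at hk
              omega
          rw [hC]
          rfl
    · -- padded empty row: all True, nothing collected for this row
      rw [List.getElem_append_right (by simp [List.length_take]; omega),
        List.getElem_replicate]
      rw [PySem.List.slice_to ([] : List Char) (b := max cols 0) (le_max_right _ _),
        PySem.List.pyRepeat_singleton]
      simp only [List.take_nil, List.map_nil, List.length_nil, List.nil_append]
      apply List.ext_getElem
      · simp
        omega
      · intro j hj1 hj2
        have hjc : j < (cols - 0).toNat := by
          simp only [List.length_map, List.length_range] at hj2
          omega
        simp only [List.getElem_map, List.getElem_range, List.getElem_replicate]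
        have hC : PySem.Set.contains
            (pvCollect (PySem.Chars.splitlines raw_text.toList) rows cols 0 PySem.Set.empty)
            ((0:Int) + (i:Int), (0:Int) + (j:Int)) = false := by
          apply Bool.eq_false_iff.mpr
          intro hct
          rw [PySem.Set.contains_iff, hmem] at hct
          rcases hct with h | ⟨i', hi', hlt', heq, k, hk, hqk, hT'⟩
          · simp [PySem.Set.empty] at h
          · omega
        rw [hC]
        rfl

-- ===== VERDICT (by name: the statement is the Claim_ definition above) =====
theorem parse_layout_map_spec : Claim_equal_parse_layout_map := by
  intro raw_text rows cols _
  unfold Spec_parse_layout_map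
  rw [a_eq_canon, canon_eq_alt]
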